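-- pv_equiv track=rewrite | github.com/telesol/ladder | deep_factor_analysis.py | prime_index
-- ===== SOURCE A (Python) =====
-- from math import sqrt, gcd, log2, log
--
-- def is_prime(n):
--     if n < 2:
--         return False
--     if n == 2:
--         return True
--     if n % 2 == 0:
--         return False
--     for i in range(3, int(sqrt(n)) + 1, 2):
--         if n % i == 0:
--             return False
--     return True
--
-- def prime_index(p):
--     """Find the index of prime p (p is the k-th prime)"""
--     if not is_prime(p):
--         return None
--     count = 0
--     n = 2
--     while n <= p:
--         if is_prime(n):
--             count += 1
--         if n == p:
--             return count
--         n += 1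
--     return None
-- ===== SOURCE B (Python) =====
-- from math import isqrt
--
-- def prime_index(p):
--     """Find the index of prime p (p is the k-th prime)"""
--     if p < 2:
--         return None
--     if any(p % d == 0 for d in range(2, isqrt(p) + 1)):
--         return None
--     sieve = [True] * (p + 1)
--     for i in range(2, p + 1):
--         for j in range(i + i, p + 1, i):
--             sieve[j] = False
--     count = 0
--     for n in range(2, p + 1):
--         if sieve[n]:
--             count += 1
--     return count
-- ===== Notes on version B (the rewrite author's own statement) =====
-- stated objective: faster
-- what changed: Replaced per-number trial division (is_prime called for every n up to p) by one divisor scan up to isqrt(p) for p itself plus a boolean-list Eratosthenes-style sieve that marks all proper multiples of each i in [2,p] and then counts the unmarked numbers.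
import Mathlib
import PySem

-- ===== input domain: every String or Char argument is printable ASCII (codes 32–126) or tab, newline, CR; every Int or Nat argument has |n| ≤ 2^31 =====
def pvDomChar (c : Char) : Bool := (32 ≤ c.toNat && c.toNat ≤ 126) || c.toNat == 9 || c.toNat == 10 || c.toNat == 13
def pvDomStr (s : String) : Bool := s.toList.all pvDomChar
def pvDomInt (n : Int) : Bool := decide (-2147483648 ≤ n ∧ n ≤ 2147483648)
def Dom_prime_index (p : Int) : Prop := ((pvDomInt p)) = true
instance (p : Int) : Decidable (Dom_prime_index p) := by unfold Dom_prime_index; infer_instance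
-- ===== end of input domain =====

-- B replaces A's per-number trial division (is_prime for every n up to p) by one
-- divisor scan up to isqrt(p) for p itself plus a boolean-list Eratosthenes-style
-- sieve that marks all proper multiples of each i in [2,p], then counts the unmarked.


-- ===== PORT A =====
-- int(sqrt(n)) is ported as Nat.sqrt n.toNat: exact for 0 ≤ n ≤ 2^31 (CPython's
-- correctly-rounded double sqrt truncates to the integer square root on that range).
def is_primeA (n : Int) : Bool :=
  if n < 2 then false
  else if n == 2 then true
  else if PySem.Int.mod n 2 == 0 then false
  else (PySem.List.pyRange 3 ((Nat.sqrt n.toNat : Int) + 1) 2).all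
        (fun i => !(PySem.Int.mod n i == 0))

-- the 'while n <= p' loop of A, with its count accumulator
def loopA (p count n : Int) : Option Int :=
  if h : n ≤ p then
    let count' := if is_primeA n then count + 1 else count
    if n == p then some count' else loopA p count' (n + 1)
  else none
termination_by (p + 1 - n).toNat
decreasing_by omega

def prime_index (p : Int) : Option Int :=
  if !is_primeA p then none
  else loopA p 0 2

-- ===== PORT B =====
-- math.isqrt(p) is Nat.sqrt p.toNat (both are the exact integer square root).
-- Python's mutable list of booleans 'sieve' is ported as Array Bool
-- (sieve[j] = False  ->  Array.set!; every written index j satisfies 0 <= j <= p < size).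
def sieveB (p : Int) : Array Bool :=
  (PySem.List.pyRange 2 (p + 1) 1).foldl
    (fun a i => (PySem.List.pyRange (i + i) (p + 1) i).foldl
      (fun a' j => a'.set! j.toNat false) a)
    (Array.replicate (p + 1).toNat true)

def prime_index_alt (p : Int) : Option Int :=
  if p < 2 then none
  else if (PySem.List.pyRange 2 ((Nat.sqrt p.toNat : Int) + 1) 1).any
            (fun d => PySem.Int.mod p d == 0) then none
  else
    let sieve := sieveB p
    some ((PySem.List.pyRange 2 (p + 1) 1).foldl
      (fun count n => if sieve[n.toNat]! then count + 1 else count) 0)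

-- ===== PRECONDITION & SPEC =====
def Spec_prime_index (p : Int) (out : Option Int) : Prop := out = prime_index_alt p
instance (p : Int) (out : Option Int) : Decidable (Spec_prime_index p out) := by unfold Spec_prime_index; infer_instance

-- ===== CLAIM (what is proved, stated in full; the proofs are below) =====
def Claim_equal_prime_index : Prop := ∀ (p : Int), Dom_prime_index p → Spec_prime_index p (prime_index p)

-- ===== LEMMAS AND PROOFS =====

theorem getBang_set (a : Array Bool) (i n : Nat) :
    (a.set! i false)[n]! = if i = n then false else a[n]! := by
  by_cases h : n < a.size <;>
    simp [Array.set!, Array.getElem!_eq_getD, Array.getD, Array.size_setIfInBounds,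
      Array.getElem_setIfInBounds, h] <;> split <;> rfl

theorem getBang_foldl_set (L : List Int) (a : Array Bool) (n : Nat) :
    (L.foldl (fun a' j => a'.set! j.toNat false) a)[n]! =
      if L.any (fun j => j.toNat == n) then false else a[n]! := by
  induction L generalizing a with
  | nil => simp
  | cons x t ih =>
    simp only [List.foldl, List.any_cons, ih, getBang_set]
    by_cases hx : x.toNat = n <;> by_cases ht : t.any (fun j => j.toNat == n) = true <;>
      simp [hx, ht]

theorem getBang_foldl_nested (g : Int → List Int) (L : List Int) (a : Array Bool) (n : Nat) :
    (L.foldl (fun acc i => (g i).foldl (fun a' j => a'.set! j.toNat false) acc) a)[n]! =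
      if L.any (fun i => (g i).any (fun j => j.toNat == n)) then false else a[n]! := by
  induction L generalizing a with
  | nil => simp
  | cons x t ih =>
    simp only [List.foldl, List.any_cons, ih, getBang_foldl_set]
    by_cases hx : (g x).any (fun j => j.toNat == n) = true <;>
      by_cases ht : t.any (fun i => (g i).any (fun j => j.toNat == n)) = true <;>
        simp [hx, ht]

theorem sieveB_true_iff (p n : Int) (h0 : 0 ≤ n) (hnp : n ≤ p) :
    (sieveB p)[n.toNat]! = true ↔
      ¬ ∃ i, 2 ≤ i ∧ i ≤ p ∧ i + i ≤ n ∧ n ≤ p ∧ i ∣ n := by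
  unfold sieveB
  rw [getBang_foldl_nested]
  have hrep : (Array.replicate (p + 1).toNat true)[n.toNat]! = true := by
    have hlt : n.toNat < (p + 1).toNat := by omega
    simp [Array.getElem!_eq_getD, Array.getD, Array.size_replicate, hlt,
      Array.getElem_replicate]
  have hany : ((PySem.List.pyRange 2 (p + 1) 1).any
      (fun i => (PySem.List.pyRange (i + i) (p + 1) i).any
        (fun j => j.toNat == n.toNat))) = true ↔
      ∃ i, 2 ≤ i ∧ i ≤ p ∧ i + i ≤ n ∧ n ≤ p ∧ i ∣ n := by
    rw [List.any_eq_true]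
    constructor
    · rintro ⟨i, hiR, hj⟩
      rw [PySem.List.mem_pyRange_one] at hiR
      rw [List.any_eq_true] at hj
      obtain ⟨j, hjR, hjn⟩ := hj
      rw [PySem.List.mem_pyRange_iff_of_pos (by omega : (0:Int) < i)] at hjR
      obtain ⟨hj1, hj2, hj3⟩ := hjR
      have hjn' : j = n := by simp only [beq_iff_eq] at hjn; omega
      subst hjn'
      refine ⟨i, by omega, by omega, by omega, by omega, ?_⟩
      have hii : i ∣ i + i := ⟨2, by ring⟩
      simpa using dvd_add hj3 hii
    · rintro ⟨i, h2i, hip, h2in, hnp', hdvd⟩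
      refine ⟨i, ?_, ?_⟩
      · rw [PySem.List.mem_pyRange_one]; omega
      · rw [List.any_eq_true]
        refine ⟨n, ?_, by simp⟩
        rw [PySem.List.mem_pyRange_iff_of_pos (by omega : (0:Int) < i)]
        exact ⟨by omega, by omega, dvd_sub hdvd ⟨2, by ring⟩⟩
  by_cases hE : ∃ i, 2 ≤ i ∧ i ≤ p ∧ i + i ≤ n ∧ n ≤ p ∧ i ∣ n
  · simp [hany.2 hE, hE]
  · have hf : ¬ ((PySem.List.pyRange 2 (p + 1) 1).any
        (fun i => (PySem.List.pyRange (i + i) (p + 1) i).any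
          (fun j => j.toNat == n.toNat)) = true) := fun hc => hE (hany.1 hc)
    simp only [Bool.not_eq_true] at hf
    simp [hf, hrep, hE]

theorem marked_iff_not_prime (p j : Int) (h2 : 2 ≤ j) (hjp : j ≤ p) :
    (∃ i, 2 ≤ i ∧ i ≤ p ∧ i + i ≤ j ∧ j ≤ p ∧ i ∣ j) ↔ ¬ Nat.Prime j.toNat := by
  constructor
  · rintro ⟨i, h2i, _, h2ij, _, hdvd⟩ hpr
    have hij : i < j := by omega
    have hiN : (i.toNat : Int) = i := Int.toNat_of_nonneg (by omega)
    have hjN : (j.toNat : Int) = j := Int.toNat_of_nonneg (by omega)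
    have hdN : i.toNat ∣ j.toNat := by
      rw [← Int.natCast_dvd_natCast, hiN, hjN]; exact hdvd
    rcases hpr.eq_one_or_self_of_dvd _ hdN with h | h <;> omega
  · intro hnp
    have hjN : (j.toNat : Int) = j := Int.toNat_of_nonneg (by omega)
    obtain ⟨m, hmd, h2m, hmlt⟩ :=
      Nat.exists_dvd_of_not_prime2 (by omega : 2 ≤ j.toNat) hnp
    have hmd2 := hmd
    obtain ⟨k, hk⟩ := hmd2
    have hk2 : 2 ≤ k := by
      rcases Nat.lt_or_ge k 2 with h | h
      · interval_cases k <;> omega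
      · exact h
    have h2m_le : m + m ≤ j.toNat := by
      calc m + m = m * 2 := by ring
        _ ≤ m * k := Nat.mul_le_mul_left m hk2
        _ = j.toNat := hk.symm
    refine ⟨(m : Int), by exact_mod_cast h2m, by omega, by omega, hjp, ?_⟩
    rw [← hjN]; exact_mod_cast hmd

theorem anyDiv_iff (p : Int) (h2 : 2 ≤ p) :
    ((PySem.List.pyRange 2 ((Nat.sqrt p.toNat : Int) + 1) 1).any
      (fun d => PySem.Int.mod p d == 0)) = true ↔ ¬ Nat.Prime p.toNat := by
  rw [List.any_eq_true]
  have hpN : (p.toNat : Int) = p := Int.toNat_of_nonneg (by omega)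
  constructor
  · rintro ⟨d, hdR, hdvd⟩ hpr
    rw [PySem.List.mem_pyRange_one] at hdR
    have hdvd' : d ∣ p := (PySem.Int.mod_eq_zero_iff_dvd p d).1 (by simpa using hdvd)
    have hdN : d.toNat ∣ p.toNat := by
      rw [← Int.natCast_dvd_natCast, Int.toNat_of_nonneg (by omega : (0:Int) ≤ d), hpN]
      exact hdvd'
    exact (Nat.prime_def_le_sqrt.1 hpr).2 d.toNat (by omega) (by omega) hdN
  · intro hnp
    rw [Nat.prime_def_le_sqrt] at hnp
    push_neg at hnp
    obtain ⟨m, h2m, hms, hmd⟩ := hnp (by omega)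
    refine ⟨(m : Int), ?_, ?_⟩
    · rw [PySem.List.mem_pyRange_one]
      refine ⟨by exact_mod_cast h2m, by push_cast; omega⟩
    · have : ((m : Int)) ∣ p := by rw [← hpN]; exact_mod_cast hmd
      simp [(PySem.Int.mod_eq_zero_iff_dvd p (m : Int)).2 this]

theorem is_primeA_iff (n : Int) : is_primeA n = true ↔ 2 ≤ n ∧ Nat.Prime n.toNat := by
  unfold is_primeA
  have hmod : ∀ a b : Int, (PySem.Int.mod a b == 0) = decide (b ∣ a) := by
    intro a b
    rcases Decidable.em (b ∣ a) with h | h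
    · simp [h, (PySem.Int.mod_eq_zero_iff_dvd a b).2 h]
    · simp only [decide_eq_false h, beq_eq_false_iff_ne, ne_eq]
      intro hc; exact h ((PySem.Int.mod_eq_zero_iff_dvd a b).1 hc)
  split_ifs with h1 h2 h3
  · simp; omega
  · have hn2 : n = 2 := by simpa using h2
    subst hn2
    decide
  · -- n ≥ 3, 2 ∣ n : not prime
    simp only [hmod, decide_eq_true_eq] at h3
    have hne : n ≠ 2 := by intro h; exact h2 (by simp [h])
    have h3n : 3 ≤ n := by omega
    simp only [false_iff, not_and]
    intro _ hpr
    have : (2:Nat) ∣ n.toNat := by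
      have : ((2:Nat) : Int) ∣ ((n.toNat : Nat) : Int) := by
        rw [Int.toNat_of_nonneg (by omega : (0:Int) ≤ n)]; exact_mod_cast h3
      exact_mod_cast this
    rcases hpr.eq_one_or_self_of_dvd _ this with h | h <;> omega
  · -- n ≥ 3, odd: trial loop over odd i up to sqrt
    have hne : n ≠ 2 := by intro h; exact h2 (by simp [h])
    have h3n : 3 ≤ n := by omega
    have hnN : (n.toNat : Int) = n := Int.toNat_of_nonneg (by omega)
    have hodd : ¬ (2:Int) ∣ n := by
      intro hc; exact h3 (by simp [hc])
    simp only [List.all_eq_true, hmod, Bool.not_eq_true', decide_eq_false_iff_not]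
    constructor
    · intro hall
      refine ⟨by omega, Nat.prime_def_le_sqrt.2 ⟨by omega, ?_⟩⟩
      intro m h2m hmsq hdvd
      have hmI : ((m:Int)) ∣ n := by rw [← hnN]; exact_mod_cast hdvd
      have hmodd : ¬ (2:Nat) ∣ m := by
        intro hc
        exact hodd (dvd_trans (by exact_mod_cast hc) hmI)
      have h3m : 3 ≤ m := by omega
      refine hall (m : Int) ?_ hmI
      rw [PySem.List.mem_pyRange_iff_of_pos (by omega : (0:Int) < 2)]
      refine ⟨by exact_mod_cast h3m, by omega, ?_⟩
      omega
    · rintro ⟨-, hpr⟩ i hi hdvd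
      rw [PySem.List.mem_pyRange_iff_of_pos (by omega : (0:Int) < 2)] at hi
      obtain ⟨h3i, hilt, -⟩ := hi
      have hiN : (i.toNat : Int) = i := Int.toNat_of_nonneg (by omega)
      have hdN : i.toNat ∣ n.toNat := by
        rw [← Int.natCast_dvd_natCast, hiN, hnN]; exact hdvd
      have hisq : i.toNat ≤ Nat.sqrt n.toNat := by omega
      exact (Nat.prime_def_le_sqrt.1 hpr).2 i.toNat (by omega) hisq hdN

theorem loopA_eq (p : Int) (hp : is_primeA p = true) :
    ∀ (fuel : Nat) (n c : Int), n ≤ p → (p - n).toNat = fuel →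
      loopA p c n =
        some (c + ((PySem.List.pyRange n (p + 1) 1).countP is_primeA : Int)) := by
  intro fuel
  induction fuel with
  | zero =>
    intro n c hnp hf
    have : n = p := by omega
    subst this
    rw [loopA]
    simp only [hnp, dif_pos, beq_self_eq_true, if_pos, hp]
    rw [PySem.List.pyRange_one_singleton]
    simp [List.countP, List.countP.go, hp]
  | succ fuel ih =>
    intro n c hnp hf
    have hlt : n < p := by omega
    rw [loopA]
    have hbne : (n == p) = false := by simp; omega
    simp only [hnp, dif_pos, hbne]
    rw [ih (n + 1) _ (by omega) (by omega)]
    rw [PySem.List.pyRange_one_cons (by omega : n < p + 1), List.countP_cons]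
    rcases hb : is_primeA n <;> simp <;> omega

-- ===== VERDICT (by name: the statement is the Claim_ definition above) =====
theorem prime_index_spec : Claim_equal_prime_index := by
  intro p _
  show prime_index p = prime_index_alt p
  by_cases h2 : p < 2
  · have hA : is_primeA p = false := by
      rcases hb : is_primeA p with _ | _
      · rfl
      · have := (is_primeA_iff p).1 hb; omega
    simp [prime_index, prime_index_alt, hA, h2]
  · rw [not_lt] at h2
    by_cases hpr : Nat.Prime p.toNat
    · have hA : is_primeA p = true := (is_primeA_iff p).2 ⟨h2, hpr⟩
      have hany : ((PySem.List.pyRange 2 ((Nat.sqrt p.toNat : Int) + 1) 1).any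
          (fun d => PySem.Int.mod p d == 0)) = false := by
        rcases hb : ((PySem.List.pyRange 2 ((Nat.sqrt p.toNat : Int) + 1) 1).any
            (fun d => PySem.Int.mod p d == 0)) with _ | _
        · rfl
        · exact absurd hpr ((anyDiv_iff p h2).1 hb)
      rw [prime_index, prime_index_alt]
      simp only [hA, Bool.not_true, if_neg (by omega : ¬ p < 2), hany,
        Bool.false_eq_true, if_false]
      rw [loopA_eq p hA ((p - 2).toNat) 2 0 h2 rfl,
        PySem.List.foldl_if_add_one (fun n : Int => (sieveB p)[n.toNat]!)]
      simp only [zero_add, Option.some_inj, Nat.cast_inj]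
      apply List.countP_congr
      intro n hn
      rw [PySem.List.mem_pyRange_one] at hn
      rw [is_primeA_iff, sieveB_true_iff p n (by omega) (by omega),
        marked_iff_not_prime p n hn.1 (by omega)]
      have h2n := hn.1
      tauto
    · have hA : is_primeA p = false := by
        rcases hb : is_primeA p with _ | _
        · rfl
        · exact absurd ((is_primeA_iff p).1 hb).2 hpr
      have hany := (anyDiv_iff p h2).2 hpr
      simp [prime_index, prime_index_alt, hA, hany]
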